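-- pv_equiv track=rewrite | github.com/AVGTechnologies/cppmangle | cppmangle/msvc.py | _m_int
-- ===== SOURCE A (Python) =====
-- def _m_int(arg):
--     r = []
--     if arg < 0:
--         r.append('?')
--         arg = -arg
--
--     if 1 <= arg <= 10:
--         r.append(str(arg - 1))
--     elif arg == 0:
--         r.append('A@')
--     else:
--         digs = []
--         while arg != 0:
--             digs.append('ABCDEFGHIJKLMNOP'[arg % 16])
--             arg = arg // 16
--         digs.reverse()
--         r.extend(digs)
--         r.append('@')
--     return ''.join(r)
-- ===== SOURCE B (Python) =====
-- _TR = str.maketrans('0123456789abcdef', 'ABCDEFGHIJKLMNOP')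
--
-- def _m_int(arg):
--     sign = ''
--     if arg < 0:
--         sign = '?'
--         arg = -arg
--     if 1 <= arg <= 10:
--         return sign + str(arg - 1)
--     if arg == 0:
--         return sign + 'A@'
--     return sign + format(arg, 'x').translate(_TR) + '@'
-- ===== Notes on version B (the rewrite author's own statement) =====
-- stated objective: idiomatic
-- what changed: The manual %16 // 16 digit-extraction loop with a final reverse() is replaced by format(arg, 'x') plus a precomputed str.maketrans translation table, producing the letters most-significant-first directly; the result list/join is replaced by direct string concatenation.
import Mathlib
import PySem

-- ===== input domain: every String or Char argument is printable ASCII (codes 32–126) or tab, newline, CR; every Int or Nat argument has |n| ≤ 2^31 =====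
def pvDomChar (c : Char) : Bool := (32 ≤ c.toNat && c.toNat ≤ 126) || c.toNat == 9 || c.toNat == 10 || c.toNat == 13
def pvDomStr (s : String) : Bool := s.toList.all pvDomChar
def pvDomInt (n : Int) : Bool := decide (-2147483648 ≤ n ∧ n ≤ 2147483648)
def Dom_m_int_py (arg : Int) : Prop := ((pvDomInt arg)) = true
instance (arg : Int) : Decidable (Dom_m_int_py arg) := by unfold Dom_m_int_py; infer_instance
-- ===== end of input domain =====

-- B replaces A's manual %16 // 16 digit-extraction loop + reverse() with hex formatting
-- (MSB-first) translated through a precomputed table; same result, more idiomatic decomposition.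


-- ===== PORT A =====
-- 'ABCDEFGHIJKLMNOP'
def pvLetters : List Char :=
  ['A','B','C','D','E','F','G','H','I','J','K','L','M','N','O','P']

-- while arg != 0: digs.append('ABCDEFGHIJKLMNOP'[arg % 16]); arg = arg // 16
-- (the 1-char Python strings are represented as Chars, joined at the end; the guard
-- '0 < arg' makes the loop total in Lean — at its only call site arg > 10, where it
-- coincides with 'arg != 0')
def pvDigsLoop (arg : Int) (digs : List Char) : List Char :=
  if h : 0 < arg then
    pvDigsLoop (PySem.Int.floordiv arg 16)
      (digs ++ [(PySem.List.pyGet? pvLetters (PySem.Int.mod arg 16)).getD ' '])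
  else digs
termination_by arg.toNat
decreasing_by
  rw [PySem.Int.floordiv_eq_ediv_of_pos (by omega)]
  omega

def m_int_py (arg : Int) : String :=
  -- r = [], plus the optional '?' and negation
  let r : List Char := if arg < 0 then ['?'] else []
  let a : Int := if arg < 0 then -arg else arg
  if 1 ≤ a ∧ a ≤ 10 then String.ofList (r ++ PySem.Int.toChars (a - 1))  -- r.append(str(arg-1))
  else if a = 0 then String.ofList (r ++ ['A','@'])                      -- r.append('A@')
  else
    let digs := (pvDigsLoop a []).reverse          -- digs built LSB-first, then reversed
    String.ofList (r ++ digs ++ ['@'])             -- r.extend(digs); r.append('@'); ''.join(r)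

-- ===== PORT B =====
-- '0123456789abcdef'
def pvHexSrc : List Char := ['0','1','2','3','4','5','6','7','8','9','a','b','c','d','e','f']

-- str.maketrans('0123456789abcdef', 'ABCDEFGHIJKLMNOP') applied to one character
-- (first-match association lookup, identity off the table, as str.translate)
def pvTransChar (c : Char) : Char := ((List.zip pvHexSrc pvLetters).lookup c).getD c

-- format(n, 'x') for 0 < n: MSB-first lowercase hex digits (exact on positive ints,
-- the only inputs it receives; ported by hand, PySem has no hex formatter)
def pvHexDigit (d : Int) : Char := (PySem.List.pyGet? pvHexSrc d).getD ' '

def pvHexChars (n : Int) : List Char :=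
  if h : 16 ≤ n then
    pvHexChars (PySem.Int.floordiv n 16) ++ [pvHexDigit (PySem.Int.mod n 16)]
  else [pvHexDigit n]
termination_by n.toNat
decreasing_by
  rw [PySem.Int.floordiv_eq_ediv_of_pos (by omega)]
  omega

def m_int_py_alt (arg : Int) : String :=
  let sign : List Char := if arg < 0 then ['?'] else []
  let a : Int := if arg < 0 then -arg else arg
  if 1 ≤ a ∧ a ≤ 10 then String.ofList (sign ++ PySem.Int.toChars (a - 1))
  else if a = 0 then String.ofList (sign ++ ['A','@'])
  else String.ofList (sign ++ (pvHexChars a).map pvTransChar ++ ['@'])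
       -- sign + format(arg,'x').translate(_TR) + '@'

-- ===== PRECONDITION & SPEC =====
def Spec_m_int_py (arg : Int) (out : String) : Prop := out = m_int_py_alt arg
instance (arg : Int) (out : String) : Decidable (Spec_m_int_py arg out) := by unfold Spec_m_int_py; infer_instance

-- ===== CLAIM (what is proved, stated in full; the proofs are below) =====
def Claim_equal_m_int_py : Prop := ∀ (arg : Int), Dom_m_int_py arg → Spec_m_int_py arg (m_int_py arg)

-- ===== LEMMAS AND PROOFS =====

-- accumulator form of A's loop
theorem pvDigsLoop_acc (arg : Int) (digs : List Char) :
    pvDigsLoop arg digs = digs ++ pvDigsLoop arg [] := by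
  by_cases h : 0 < arg
  · rw [pvDigsLoop, dif_pos h,
        pvDigsLoop_acc (PySem.Int.floordiv arg 16)
          (digs ++ [(PySem.List.pyGet? pvLetters (PySem.Int.mod arg 16)).getD ' '])]
    conv_rhs => rw [pvDigsLoop, dif_pos h,
        pvDigsLoop_acc (PySem.Int.floordiv arg 16)
          ([] ++ [(PySem.List.pyGet? pvLetters (PySem.Int.mod arg 16)).getD ' '])]
    simp
  · rw [pvDigsLoop, dif_neg h]
    conv_rhs => rw [pvDigsLoop, dif_neg h]
    simp
termination_by arg.toNat
decreasing_by all_goals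
  rw [PySem.Int.floordiv_eq_ediv_of_pos (by omega)]
  omega

-- translating a hex digit gives exactly A's letter for that digit value
theorem pvTrans_hexDigit (d : Int) (h0 : 0 ≤ d) (h16 : d < 16) :
    pvTransChar (pvHexDigit d) = (PySem.List.pyGet? pvLetters d).getD ' ' := by
  interval_cases d <;> decide

-- the core: A's reversed LSB-first digit list = B's translated MSB-first hex digits
theorem pvDigs_eq_hex (a : Int) (ha : 0 < a) :
    (pvDigsLoop a []).reverse = (pvHexChars a).map pvTransChar := by
  have hd0 : 0 ≤ PySem.Int.mod a 16 := by
    rw [PySem.Int.mod_eq_emod_of_pos (by omega)]; omega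
  have hd16 : PySem.Int.mod a 16 < 16 := by
    rw [PySem.Int.mod_eq_emod_of_pos (by omega)]; omega
  rw [pvDigsLoop, dif_pos ha, pvDigsLoop_acc]
  by_cases h16 : 16 ≤ a
  · have hq : 0 < PySem.Int.floordiv a 16 := by
      rw [PySem.Int.floordiv_eq_ediv_of_pos (by omega)]; omega
    rw [pvHexChars, dif_pos h16, List.map_append,
        ← pvDigs_eq_hex (PySem.Int.floordiv a 16) hq]
    simp only [List.nil_append, List.reverse_append, List.reverse_cons, List.reverse_nil,
      List.map_cons, List.map_nil]
    rw [pvTrans_hexDigit _ hd0 hd16]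
  · have hq0 : PySem.Int.floordiv a 16 = 0 := by
      rw [PySem.Int.floordiv_eq_ediv_of_pos (by omega)]; omega
    have hm : PySem.Int.mod a 16 = a := by
      rw [PySem.Int.mod_eq_emod_of_pos (by omega)]; omega
    rw [hq0, pvHexChars, dif_neg h16]
    conv_lhs => rw [pvDigsLoop, dif_neg (by omega : ¬ (0:Int) < 0)]
    simp only [List.map_cons, List.map_nil]
    rw [hm, pvTrans_hexDigit a (by omega) (by omega)]
    rfl
termination_by a.toNat
decreasing_by
  rw [PySem.Int.floordiv_eq_ediv_of_pos (by omega)]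
  omega

-- ===== VERDICT (by name: the statement is the Claim_ definition above) =====
theorem m_int_py_spec : Claim_equal_m_int_py := by
  intro arg _
  unfold Spec_m_int_py m_int_py m_int_py_alt
  by_cases hneg : arg < 0 <;>
    simp only [hneg, if_true, if_false] <;>
    split_ifs with h1 h2
  · rfl
  · rfl
  · rw [pvDigs_eq_hex (-arg) (by omega)]
  · rfl
  · rfl
  · rw [pvDigs_eq_hex arg (by omega)]
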